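-- pv_equiv track=rewrite | github.com/mdiazv/codejam | 2018/qual/a/save.py | damage
-- ===== SOURCE A (Python) =====
-- def damage(s):
--     d = 0
--     p = 1
--     for c in s:
--         if c == 'C':
--             p *= 2
--         else:
--             d += p
--     return d
-- ===== SOURCE B (Python) =====
-- def damage(s):
--     acc = 0
--     for c in reversed(s):
--         if c == 'C':
--             acc *= 2
--         else:
--             acc += 1
--     return acc
-- ===== Notes on version B (the rewrite author's own statement) =====
-- stated objective: alternative
-- what changed: Replaces the two-variable forward scan (running power p and damage d) by a single-accumulator scan over the reversed string, where each 'C' doubles the damage accumulated so far and each other character adds 1.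
import Mathlib
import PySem

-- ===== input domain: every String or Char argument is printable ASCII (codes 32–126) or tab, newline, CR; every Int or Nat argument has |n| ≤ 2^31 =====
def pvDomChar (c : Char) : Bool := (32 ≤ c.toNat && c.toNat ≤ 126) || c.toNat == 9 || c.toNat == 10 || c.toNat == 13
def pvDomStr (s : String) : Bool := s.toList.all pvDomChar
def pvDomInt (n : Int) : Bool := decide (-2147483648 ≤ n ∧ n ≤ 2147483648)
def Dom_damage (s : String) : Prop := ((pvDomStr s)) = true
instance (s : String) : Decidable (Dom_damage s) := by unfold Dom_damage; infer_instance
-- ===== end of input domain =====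

-- B replaces A's forward scan with two state variables (power, damage) by a
-- single-accumulator scan over the reversed string; same O(n) cost.

-- ===== PORT A =====
-- A: forward loop over s with state (d, p); 'C' doubles p, anything else adds p to d.
def damage (s : String) : Int :=
  (s.toList.foldl (fun (st : Int × Int) c =>
    if c = 'C' then (st.1, st.2 * 2) else (st.1 + st.2, st.2)) (0, 1)).1

-- ===== PORT B =====
-- B: loop over reversed(s) with one accumulator acc; 'C' doubles acc, else acc+1.
def damage_alt (s : String) : Int :=
  s.toList.reverse.foldl (fun (acc : Int) c =>
    if c = 'C' then acc * 2 else acc + 1) 0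

-- ===== PRECONDITION & SPEC =====
def Spec_damage (s : String) (out : Int) : Prop := out = damage_alt s
instance (s : String) (out : Int) : Decidable (Spec_damage s out) := by unfold Spec_damage; infer_instance

-- ===== CLAIM (what is proved, stated in full; the proofs are below) =====
def Claim_equal_damage : Prop := ∀ (s : String), Dom_damage s → Spec_damage s (damage s)

-- ===== LEMMAS AND PROOFS =====

-- B's reversed foldl is a foldr over the original list.
def pvStep (c : Char) (acc : Int) : Int := if c = 'C' then acc * 2 else acc + 1

theorem damage_alt_eq_foldr (s : String) :
    damage_alt s = s.toList.foldr pvStep 0 := by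
  unfold damage_alt
  rw [List.foldl_reverse]
  rfl

-- Invariant of A's loop: starting from (d, p) it returns d + p * (foldr result).
theorem damage_loop_inv (l : List Char) (d p : Int) :
    (l.foldl (fun (st : Int × Int) c =>
      if c = 'C' then (st.1, st.2 * 2) else (st.1 + st.2, st.2)) (d, p)).1
    = d + p * l.foldr pvStep 0 := by
  induction l generalizing d p with
  | nil => simp
  | cons c t ih =>
    simp only [List.foldl_cons, List.foldr_cons, pvStep]
    by_cases h : c = 'C' <;> simp [h, ih] <;> ring

-- ===== VERDICT (by name: the statement is the Claim_ definition above) =====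
theorem damage_spec : Claim_equal_damage := by
  intro s _
  unfold Spec_damage damage
  rw [damage_alt_eq_foldr, damage_loop_inv]
  ring
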